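-- pv_equiv track=rewrite | github.com/T-Srikanth/DSML | A15.py | ama_substrings
-- ===== SOURCE A (Python) =====
-- def ama_substrings(S):
--   n = len(S)
--   se = set(['a','e','i','o','u','A','E','I','O','U'])
--   count = 0
--   for i in range(n-1, -1, -1):
--     if S[i] in se:
--       count += n-i
--   return count
-- ===== SOURCE B (Python) =====
-- def ama_substrings(S):
--   vowels = set("aeiouAEIOU")
--   seen = 0
--   total = 0
--   for ch in S:
--     if ch in vowels:
--       seen += 1
--     total += seen
--   return total
-- ===== Notes on version B (the rewrite author's own statement) =====
-- stated objective: alternative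
-- what changed: Replaced A's backward scan that adds the positional weight n-i for each vowel with a forward pass maintaining a running prefix count of vowels added to the total at every character (sum over end positions instead of per-vowel weights).
import Mathlib
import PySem

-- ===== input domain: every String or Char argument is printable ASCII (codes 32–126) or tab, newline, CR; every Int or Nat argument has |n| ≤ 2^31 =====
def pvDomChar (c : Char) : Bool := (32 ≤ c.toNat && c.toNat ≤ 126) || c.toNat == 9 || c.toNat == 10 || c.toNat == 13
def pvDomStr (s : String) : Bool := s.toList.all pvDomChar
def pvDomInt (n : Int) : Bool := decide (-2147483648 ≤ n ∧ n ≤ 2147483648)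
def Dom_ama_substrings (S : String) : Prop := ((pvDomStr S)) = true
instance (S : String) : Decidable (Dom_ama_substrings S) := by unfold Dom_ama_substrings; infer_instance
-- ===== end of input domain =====

-- B replaces A's backward loop (each vowel weighted by n-i) with a forward pass adding a
-- running prefix vowel count at every character; same O(n), alternative decomposition.

-- ===== PORT A =====
def ama_substrings (S : String) : Int :=
  let n : Int := PySem.Str.len S
  let se : PySem.Set Char := PySem.Set.ofList ['a','e','i','o','u','A','E','I','O','U']
  (PySem.List.pyRange (n - 1) (-1) (-1)).foldl
    (fun count i =>
      match PySem.Str.pyGet? S i with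
      | some c => if c ∈ se then count + (n - i) else count
      | none => count) 0

-- ===== PORT B =====
def ama_substrings_alt (S : String) : Int :=
  let vowels : PySem.Set Char := PySem.Set.ofList "aeiouAEIOU".toList
  let r := S.toList.foldl
    (fun (st : Int × Int) ch =>
      let seen := if ch ∈ vowels then st.1 + 1 else st.1
      (seen, st.2 + seen)) (0, 0)
  r.2

-- ===== PRECONDITION & SPEC =====
def Spec_ama_substrings (S : String) (out : Int) : Prop := out = ama_substrings_alt S
instance (S : String) (out : Int) : Decidable (Spec_ama_substrings S out) := by unfold Spec_ama_substrings; infer_instance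

-- ===== CLAIM (what is proved, stated in full; the proofs are below) =====
def Claim_equal_ama_substrings : Prop := ∀ (S : String), Dom_ama_substrings S → Spec_ama_substrings S (ama_substrings S)

-- ===== LEMMAS AND PROOFS =====

def pvVowels : List Char := ['a','e','i','o','u','A','E','I','O','U']

-- the common weighted sum pvF L = Σ_{i < |L|, L[i] vowel} (|L| - i)
def pvF : List Char → Int
  | [] => 0
  | c :: L => (if c ∈ pvVowels then ((L.length : Int) + 1) else 0) + pvF L

-- the per-index weight appearing in A's sum
def pvG (L : List Char) (j : Nat) : Int :=
  match L[j]? with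
  | some c => if c ∈ pvVowels then (L.length : Int) - j else 0
  | none => 0

-- B-side loop invariant
lemma pvB_inv (L : List Char) (s t : Int) :
    (L.foldl (fun (st : Int × Int) ch =>
      let seen := if ch ∈ (PySem.Set.ofList "aeiouAEIOU".toList : PySem.Set Char) then st.1 + 1 else st.1
      (seen, st.2 + seen)) (s, t)).2 = t + s * L.length + pvF L := by
  induction L generalizing s t with
  | nil => simp [pvF]
  | cons c L ih =>
    have hv : (c ∈ (PySem.Set.ofList "aeiouAEIOU".toList : PySem.Set Char)) ↔ c ∈ pvVowels := by
      rw [PySem.Set.mem_ofList]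
      have : "aeiouAEIOU".toList = pvVowels := by decide
      rw [this]
    simp only [List.foldl_cons]
    by_cases h : c ∈ pvVowels
    · rw [if_pos (hv.mpr h), ih]
      simp [pvF, if_pos h]; ring
    · rw [if_neg (fun hc => h (hv.mp hc)), ih]
      simp [pvF, if_neg h]; ring

-- A-side sum equals pvF
lemma pvG_sum (L : List Char) : (∑ j ∈ Finset.range L.length, pvG L j) = pvF L := by
  induction L with
  | nil => simp [pvF]
  | cons c L ih =>
    have hlen : (c :: L).length = L.length + 1 := rfl
    rw [hlen, Finset.sum_range_succ']
    have h0 : pvG (c :: L) 0 = (if c ∈ pvVowels then ((L.length : Int) + 1) else 0) := by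
      simp [pvG]
    have hs : (∑ j ∈ Finset.range L.length, pvG (c :: L) (j + 1))
        = ∑ j ∈ Finset.range L.length, pvG L j := by
      refine Finset.sum_congr rfl (fun j hj => ?_)
      have hj' : j < L.length := Finset.mem_range.mp hj
      simp only [pvG, List.getElem?_cons_succ]
      cases hg : L[j]? with
      | none => rfl
      | some d =>
        by_cases hd : d ∈ pvVowels <;> simp [hd]
    rw [h0, hs, ih, pvF]
    ring

theorem ama_substrings_spec : Claim_equal_ama_substrings := by
  intro S _
  unfold Spec_ama_substrings ama_substrings ama_substrings_alt
  simp only []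
  rw [pvB_inv]
  -- rewrite A's fold body into "acc + weight" form
  have hse : ∀ c : Char,
      (c ∈ (PySem.Set.ofList ['a','e','i','o','u','A','E','I','O','U'] : PySem.Set Char)) ↔ c ∈ pvVowels := by
    intro c; rw [PySem.Set.mem_ofList]; rfl
  set L := S.toList with hL
  have hSL : S.length = L.length := by rw [hL, String.length_toList]
  have hn : PySem.Str.len S = (L.length : Int) := by simp [hL]
  have hfun : (fun (count : Int) (i : Int) =>
      match PySem.Str.pyGet? S i with
      | some c => if c ∈ (PySem.Set.ofList ['a','e','i','o','u','A','E','I','O','U'] : PySem.Set Char)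
                  then count + (PySem.Str.len S - i) else count
      | none => count)
      = (fun (count : Int) (i : Int) => count +
          (match PySem.Str.pyGet? S i with
           | some c => if c ∈ pvVowels then PySem.Str.len S - i else 0
           | none => 0)) := by
    funext count i
    cases hg : PySem.Str.pyGet? S i with
    | none => exact (add_zero count).symm
    | some c =>
      by_cases hc : c ∈ pvVowels
      · simp only [if_pos ((hse c).mpr hc), if_pos hc]
      · simp only [if_neg (fun h => hc ((hse c).mp h)), if_neg hc]; ring
  rw [hfun, PySem.List.foldl_add]
  rw [PySem.List.pyRange_neg_one]
  have hcnt : (PySem.Str.len S - 1 - (-1)).toNat = L.length := by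
    rw [hn]; omega
  rw [hcnt, List.map_map]
  -- the mapped sum as a Finset.range sum
  have hlist : ∀ (f : Nat → Int) (m : Nat),
      ((List.range m).map f).sum = ∑ j ∈ Finset.range m, f j := fun f m => rfl
  rw [hlist]
  have hpt : ∀ j ∈ Finset.range L.length,
      ((fun i => (match PySem.Str.pyGet? S i with
           | some c => if c ∈ pvVowels then PySem.Str.len S - i else 0
           | none => 0)) ∘ (fun k : Nat => PySem.Str.len S - 1 - (k : Int))) j
        = (fun j : Nat => pvG L (L.length - 1 - j)) j := by
    intro j hj
    have hj' : j < L.length := Finset.mem_range.mp hj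
    have hidx : PySem.Str.len S - 1 - (j : Int) = ((L.length - 1 - j : Nat) : Int) := by
      rw [hn]; omega
    simp only [Function.comp, hidx]
    have : PySem.Str.pyGet? S ((L.length - 1 - j : Nat) : Int) = L[(L.length - 1 - j : Nat)]? := by
      simp [hL]
    rw [this]
    simp only [pvG]
    cases hg : L[(L.length - 1 - j : Nat)]? with
    | none => rfl
    | some c =>
      by_cases hc : c ∈ pvVowels
      · simp [hc]
        omega
      · simp [hc]
  rw [Finset.sum_congr rfl hpt, Finset.sum_range_reflect (fun j => pvG L j) L.length, pvG_sum]
  ring
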